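-- pv_equiv track=rewrite | github.com/Pradeep-gif-hub/MedTech | healthconnect-backend/routers/consultations.py | _is_specialization_match
-- ===== SOURCE A (Python) =====
-- SPECIALIZATION_ALIASES = {
--     "General Medicine": ["general medicine", "general physician", "family medicine", "internal medicine"],
--     "Cardiology": ["cardiology", "cardiologist", "heart specialist"],
--     "Respiratory": ["respiratory", "pulmonology", "pulmonologist", "chest specialist"],
--     "Neurology": ["neurology", "neurologist", "brain specialist"],
--     "Dermatology": ["dermatology", "dermatologist", "skin specialist"],
-- }
--
-- def _normalize_text(value: str | None) -> str:
--     return " ".join((value or "").strip().lower().replace("&", " and ").split())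
--
-- def _is_specialization_match(doctor_specialization: str | None, target_specialization: str | None) -> bool:
--     doctor_norm = _normalize_text(doctor_specialization)
--     target_norm = _normalize_text(target_specialization)
--     if not doctor_norm or not target_norm:
--         return False
--
--     if doctor_norm == target_norm:
--         return True
--
--     target_aliases = [_normalize_text(x) for x in SPECIALIZATION_ALIASES.get(target_specialization or "", [])]
--     if doctor_norm in target_aliases:
--         return True
--
--     for canonical, aliases in SPECIALIZATION_ALIASES.items():
--         alias_norms = [_normalize_text(x) for x in aliases]
--         if doctor_norm in alias_norms and target_norm == _normalize_text(canonical):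
--             return True
--
--     return False
-- ===== SOURCE B (Python) =====
-- SPECIALIZATION_ALIASES = {
--     "General Medicine": ["general medicine", "general physician", "family medicine", "internal medicine"],
--     "Cardiology": ["cardiology", "cardiologist", "heart specialist"],
--     "Respiratory": ["respiratory", "pulmonology", "pulmonologist", "chest specialist"],
--     "Neurology": ["neurology", "neurologist", "brain specialist"],
--     "Dermatology": ["dermatology", "dermatologist", "skin specialist"],
-- }
--
-- def _normalize_text(value: str | None) -> str:
--     return " ".join((value or "").strip().lower().replace("&", " and ").split())
--
-- _ALIAS_TO_CANON = {
--     _normalize_text(a): _normalize_text(canon)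
--     for canon, aliases in SPECIALIZATION_ALIASES.items()
--     for a in aliases
-- }
--
-- def _is_specialization_match(doctor_specialization, target_specialization):
--     doctor_norm = _normalize_text(doctor_specialization)
--     target_norm = _normalize_text(target_specialization)
--     if not doctor_norm or not target_norm:
--         return False
--     return doctor_norm == target_norm or _ALIAS_TO_CANON.get(doctor_norm) == target_norm
-- ===== Notes on version B (the rewrite author's own statement) =====
-- stated objective: simpler
-- what changed: A's raw-key alias branch and its per-canonical scan over SPECIALIZATION_ALIASES are replaced by a single lookup in a reverse index (normalized alias -> normalized canonical) precomputed once at module load; the scan and the raw-key branch (which it subsumes) disappear.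
import Mathlib
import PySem

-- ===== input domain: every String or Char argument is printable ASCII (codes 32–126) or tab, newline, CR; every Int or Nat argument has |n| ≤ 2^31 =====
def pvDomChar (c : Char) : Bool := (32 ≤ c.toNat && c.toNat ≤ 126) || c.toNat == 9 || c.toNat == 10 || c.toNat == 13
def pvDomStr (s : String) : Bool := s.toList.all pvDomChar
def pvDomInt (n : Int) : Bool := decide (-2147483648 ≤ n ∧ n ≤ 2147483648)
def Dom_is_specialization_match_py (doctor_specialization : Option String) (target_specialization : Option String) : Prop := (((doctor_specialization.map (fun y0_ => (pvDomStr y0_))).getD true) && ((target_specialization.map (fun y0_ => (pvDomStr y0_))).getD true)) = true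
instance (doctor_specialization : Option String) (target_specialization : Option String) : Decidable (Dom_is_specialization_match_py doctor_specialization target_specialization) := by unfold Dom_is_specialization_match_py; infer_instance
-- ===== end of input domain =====

-- B replaces A's raw-key alias branch and per-canonical scan by one lookup in a
-- precomputed reverse index (alias norm → canonical norm); objective: simpler.

-- ===== PORT A =====

-- module constant SPECIALIZATION_ALIASES (a dict literal, in insertion order)
def specializationAliases : PySem.Dict String (List String) := PySem.Dict.ofList
  [ ("General Medicine", ["general medicine", "general physician", "family medicine", "internal medicine"])
  , ("Cardiology", ["cardiology", "cardiologist", "heart specialist"])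
  , ("Respiratory", ["respiratory", "pulmonology", "pulmonologist", "chest specialist"])
  , ("Neurology", ["neurology", "neurologist", "brain specialist"])
  , ("Dermatology", ["dermatology", "dermatologist", "skin specialist"]) ]

-- _normalize_text(value) = " ".join((value or "").strip().lower().replace("&", " and ").split())
def normalizeText (value : Option String) : String :=
  let s := match value with | none => "" | some s => s   -- (value or "") : "" stays ""
  PySem.Str.join " " (PySem.Str.split₀ (PySem.Str.replace (PySem.Str.lower (PySem.Str.strip s)) "&" " and "))

-- the 'for canonical, aliases in SPECIALIZATION_ALIASES.items():' loop
def matchLoop (doctorNorm targetNorm : String) : List (String × List String) → Bool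
  | [] => false
  | (canonical, aliases) :: rest =>
      let aliasNorms := aliases.map (fun x => normalizeText (some x))
      if aliasNorms.contains doctorNorm && targetNorm == normalizeText (some canonical) then true
      else matchLoop doctorNorm targetNorm rest

def is_specialization_match_py (doctor_specialization : Option String) (target_specialization : Option String) : Bool :=
  let doctorNorm := normalizeText doctor_specialization
  let targetNorm := normalizeText target_specialization
  if doctorNorm == "" || targetNorm == "" then false
  else if doctorNorm == targetNorm then true
  else
    let targetAliases := (PySem.Dict.getD specializationAliases
        (match target_specialization with | none => "" | some s => s) []).map (fun x => normalizeText (some x))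
    if targetAliases.contains doctorNorm then true
    else matchLoop doctorNorm targetNorm specializationAliases.items

-- ===== PORT B =====

-- _ALIAS_TO_CANON = { norm(a): norm(canon) for canon, aliases in SPECIALIZATION_ALIASES.items() for a in aliases }
def aliasToCanon : PySem.Dict String String :=
  specializationAliases.items.foldl
    (fun acc p => p.2.foldl (fun acc2 a => PySem.Dict.insert acc2 (normalizeText (some a)) (normalizeText (some p.1))) acc)
    PySem.Dict.empty

def is_specialization_match_py_alt (doctor_specialization : Option String) (target_specialization : Option String) : Bool :=
  let doctorNorm := normalizeText doctor_specialization
  let targetNorm := normalizeText target_specialization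
  if doctorNorm == "" || targetNorm == "" then false
  else doctorNorm == targetNorm || (PySem.Dict.get? aliasToCanon doctorNorm == some targetNorm)

-- ===== PRECONDITION & SPEC =====
def Spec_is_specialization_match_py (doctor_specialization : Option String) (target_specialization : Option String) (out : Bool) : Prop := out = is_specialization_match_py_alt doctor_specialization target_specialization
instance (doctor_specialization : Option String) (target_specialization : Option String) (out : Bool) : Decidable (Spec_is_specialization_match_py doctor_specialization target_specialization out) := by unfold Spec_is_specialization_match_py; infer_instance

-- ===== CLAIM (what is proved, stated in full; the proofs are below) =====
def Claim_equal_is_specialization_match_py : Prop := ∀ (doctor_specialization : Option String) (target_specialization : Option String), Dom_is_specialization_match_py doctor_specialization target_specialization → Spec_is_specialization_match_py doctor_specialization target_specialization (is_specialization_match_py doctor_specialization target_specialization)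

-- ===== LEMMAS AND PROOFS =====

-- the reverse index as the literal dict the fold builds
lemma atc_lit : aliasToCanon = PySem.Dict.mk [("general medicine", "general medicine"), ("general physician", "general medicine"), ("family medicine", "general medicine"), ("internal medicine", "general medicine"), ("cardiology", "cardiology"), ("cardiologist", "cardiology"), ("heart specialist", "cardiology"), ("respiratory", "respiratory"), ("pulmonology", "respiratory"), ("pulmonologist", "respiratory"), ("chest specialist", "respiratory"), ("neurology", "neurology"), ("neurologist", "neurology"), ("brain specialist", "neurology"), ("dermatology", "dermatology"), ("dermatologist", "dermatology"), ("skin specialist", "dermatology")] := by rfl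

-- The scan over the alias table returns true exactly when the reverse index sends
-- doctorNorm to targetNorm (the 17 normalized aliases are pairwise distinct).
lemma matchLoop_eq_lookup (dn tn : String) :
    matchLoop dn tn specializationAliases.items
      = (PySem.Dict.get? aliasToCanon dn == some tn) := by
  have h1 : normalizeText (some "general medicine") = "general medicine" := by rfl
  have h2 : normalizeText (some "general physician") = "general physician" := by rfl
  have h3 : normalizeText (some "family medicine") = "family medicine" := by rfl
  have h4 : normalizeText (some "internal medicine") = "internal medicine" := by rfl
  have h5 : normalizeText (some "cardiology") = "cardiology" := by rfl
  have h6 : normalizeText (some "cardiologist") = "cardiologist" := by rfl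
  have h7 : normalizeText (some "heart specialist") = "heart specialist" := by rfl
  have h8 : normalizeText (some "respiratory") = "respiratory" := by rfl
  have h9 : normalizeText (some "pulmonology") = "pulmonology" := by rfl
  have h10 : normalizeText (some "pulmonologist") = "pulmonologist" := by rfl
  have h11 : normalizeText (some "chest specialist") = "chest specialist" := by rfl
  have h12 : normalizeText (some "neurology") = "neurology" := by rfl
  have h13 : normalizeText (some "neurologist") = "neurologist" := by rfl
  have h14 : normalizeText (some "brain specialist") = "brain specialist" := by rfl
  have h15 : normalizeText (some "dermatology") = "dermatology" := by rfl
  have h16 : normalizeText (some "dermatologist") = "dermatologist" := by rfl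
  have h17 : normalizeText (some "skin specialist") = "skin specialist" := by rfl
  have hc1 : normalizeText (some "General Medicine") = "general medicine" := by rfl
  have hc2 : normalizeText (some "Cardiology") = "cardiology" := by rfl
  have hc3 : normalizeText (some "Respiratory") = "respiratory" := by rfl
  have hc4 : normalizeText (some "Neurology") = "neurology" := by rfl
  have hc5 : normalizeText (some "Dermatology") = "dermatology" := by rfl
  have hitems : specializationAliases.items = [ ("General Medicine", ["general medicine", "general physician", "family medicine", "internal medicine"]) , ("Cardiology", ["cardiology", "cardiologist", "heart specialist"]) , ("Respiratory", ["respiratory", "pulmonology", "pulmonologist", "chest specialist"]) , ("Neurology", ["neurology", "neurologist", "brain specialist"]) , ("Dermatology", ["dermatology", "dermatologist", "skin specialist"]) ] := by rfl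
  have hbeq : ∀ (a b : String), decide (a = b) = (b == a) := by
    intro a b; by_cases h : a = b
    · simp [h]
    · simp [h, Ne.symm h]
  rw [hitems, atc_lit]
  simp only [matchLoop, List.map_cons, List.map_nil, h1, h2, h3, h4, h5, h6, h7, h8, h9, h10, h11, h12, h13, h14, h15, h16, h17, hc1, hc2, hc3, hc4, hc5, PySem.Dict.get?_mk_cons, List.contains_cons, List.contains_nil]
  by_cases e1 : "general medicine" = dn
  case pos => subst e1; simp [hbeq]
  by_cases e2 : "general physician" = dn
  case pos => subst e2; simp [hbeq]
  by_cases e3 : "family medicine" = dn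
  case pos => subst e3; simp [hbeq]
  by_cases e4 : "internal medicine" = dn
  case pos => subst e4; simp [hbeq]
  by_cases e5 : "cardiology" = dn
  case pos => subst e5; simp [hbeq]
  by_cases e6 : "cardiologist" = dn
  case pos => subst e6; simp [hbeq]
  by_cases e7 : "heart specialist" = dn
  case pos => subst e7; simp [hbeq]
  by_cases e8 : "respiratory" = dn
  case pos => subst e8; simp [hbeq]
  by_cases e9 : "pulmonology" = dn
  case pos => subst e9; simp [hbeq]
  by_cases e10 : "pulmonologist" = dn
  case pos => subst e10; simp [hbeq]
  by_cases e11 : "chest specialist" = dn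
  case pos => subst e11; simp [hbeq]
  by_cases e12 : "neurology" = dn
  case pos => subst e12; simp [hbeq]
  by_cases e13 : "neurologist" = dn
  case pos => subst e13; simp [hbeq]
  by_cases e14 : "brain specialist" = dn
  case pos => subst e14; simp [hbeq]
  by_cases e15 : "dermatology" = dn
  case pos => subst e15; simp [hbeq]
  by_cases e16 : "dermatologist" = dn
  case pos => subst e16; simp [hbeq]
  by_cases e17 : "skin specialist" = dn
  case pos => subst e17; simp [hbeq]
  simp [e1, e2, e3, e4, e5, e6, e7, e8, e9, e10, e11, e12, e13, e14, e15, e16, e17, Ne.symm e1, Ne.symm e2, Ne.symm e3, Ne.symm e4, Ne.symm e5, Ne.symm e6, Ne.symm e7, Ne.symm e8, Ne.symm e9, Ne.symm e10, Ne.symm e11, Ne.symm e12, Ne.symm e13, Ne.symm e14, Ne.symm e15, Ne.symm e16, Ne.symm e17, PySem.Dict.get?]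

-- The raw-key branch is subsumed by the scan: a hit there implies a scan hit.
lemma rawBranch_subsumed (rawT : String) (dn : String)
    (h : ((PySem.Dict.getD specializationAliases rawT []).map
          (fun x => normalizeText (some x))).contains dn = true) :
    matchLoop dn (normalizeText (some rawT)) specializationAliases.items = true := by
  have h1 : normalizeText (some "general medicine") = "general medicine" := by rfl
  have h2 : normalizeText (some "general physician") = "general physician" := by rfl
  have h3 : normalizeText (some "family medicine") = "family medicine" := by rfl
  have h4 : normalizeText (some "internal medicine") = "internal medicine" := by rfl
  have h5 : normalizeText (some "cardiology") = "cardiology" := by rfl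
  have h6 : normalizeText (some "cardiologist") = "cardiologist" := by rfl
  have h7 : normalizeText (some "heart specialist") = "heart specialist" := by rfl
  have h8 : normalizeText (some "respiratory") = "respiratory" := by rfl
  have h9 : normalizeText (some "pulmonology") = "pulmonology" := by rfl
  have h10 : normalizeText (some "pulmonologist") = "pulmonologist" := by rfl
  have h11 : normalizeText (some "chest specialist") = "chest specialist" := by rfl
  have h12 : normalizeText (some "neurology") = "neurology" := by rfl
  have h13 : normalizeText (some "neurologist") = "neurologist" := by rfl
  have h14 : normalizeText (some "brain specialist") = "brain specialist" := by rfl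
  have h15 : normalizeText (some "dermatology") = "dermatology" := by rfl
  have h16 : normalizeText (some "dermatologist") = "dermatologist" := by rfl
  have h17 : normalizeText (some "skin specialist") = "skin specialist" := by rfl
  have hc1 : normalizeText (some "General Medicine") = "general medicine" := by rfl
  have hc2 : normalizeText (some "Cardiology") = "cardiology" := by rfl
  have hc3 : normalizeText (some "Respiratory") = "respiratory" := by rfl
  have hc4 : normalizeText (some "Neurology") = "neurology" := by rfl
  have hc5 : normalizeText (some "Dermatology") = "dermatology" := by rfl
  have hitems : specializationAliases.items = [ ("General Medicine", ["general medicine", "general physician", "family medicine", "internal medicine"]) , ("Cardiology", ["cardiology", "cardiologist", "heart specialist"]) , ("Respiratory", ["respiratory", "pulmonology", "pulmonologist", "chest specialist"]) , ("Neurology", ["neurology", "neurologist", "brain specialist"]) , ("Dermatology", ["dermatology", "dermatologist", "skin specialist"]) ] := by rfl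
  by_cases r1 : rawT = "General Medicine"
  case pos =>
    subst r1
    rw [show specializationAliases.getD "General Medicine" [] = ["general medicine", "general physician", "family medicine", "internal medicine"] from rfl] at h
    rw [hc1]
    simp only [hitems, matchLoop, List.map_cons, List.map_nil, h1, h2, h3, h4, h5, h6, h7, h8, h9, h10, h11, h12, h13, h14, h15, h16, h17, hc1, hc2, hc3, hc4, hc5] at h ⊢
    simp_all
  by_cases r2 : rawT = "Cardiology"
  case pos =>
    subst r2
    rw [show specializationAliases.getD "Cardiology" [] = ["cardiology", "cardiologist", "heart specialist"] from rfl] at h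
    rw [hc2]
    simp only [hitems, matchLoop, List.map_cons, List.map_nil, h1, h2, h3, h4, h5, h6, h7, h8, h9, h10, h11, h12, h13, h14, h15, h16, h17, hc1, hc2, hc3, hc4, hc5] at h ⊢
    simp_all
  by_cases r3 : rawT = "Respiratory"
  case pos =>
    subst r3
    rw [show specializationAliases.getD "Respiratory" [] = ["respiratory", "pulmonology", "pulmonologist", "chest specialist"] from rfl] at h
    rw [hc3]
    simp only [hitems, matchLoop, List.map_cons, List.map_nil, h1, h2, h3, h4, h5, h6, h7, h8, h9, h10, h11, h12, h13, h14, h15, h16, h17, hc1, hc2, hc3, hc4, hc5] at h ⊢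
    simp_all
  by_cases r4 : rawT = "Neurology"
  case pos =>
    subst r4
    rw [show specializationAliases.getD "Neurology" [] = ["neurology", "neurologist", "brain specialist"] from rfl] at h
    rw [hc4]
    simp only [hitems, matchLoop, List.map_cons, List.map_nil, h1, h2, h3, h4, h5, h6, h7, h8, h9, h10, h11, h12, h13, h14, h15, h16, h17, hc1, hc2, hc3, hc4, hc5] at h ⊢
    simp_all
  by_cases r5 : rawT = "Dermatology"
  case pos =>
    subst r5
    rw [show specializationAliases.getD "Dermatology" [] = ["dermatology", "dermatologist", "skin specialist"] from rfl] at h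
    rw [hc5]
    simp only [hitems, matchLoop, List.map_cons, List.map_nil, h1, h2, h3, h4, h5, h6, h7, h8, h9, h10, h11, h12, h13, h14, h15, h16, h17, hc1, hc2, hc3, hc4, hc5] at h ⊢
    simp_all
  exfalso
  rw [show specializationAliases = PySem.Dict.mk [ ("General Medicine", ["general medicine", "general physician", "family medicine", "internal medicine"]) , ("Cardiology", ["cardiology", "cardiologist", "heart specialist"]) , ("Respiratory", ["respiratory", "pulmonology", "pulmonologist", "chest specialist"]) , ("Neurology", ["neurology", "neurologist", "brain specialist"]) , ("Dermatology", ["dermatology", "dermatologist", "skin specialist"]) ] from rfl] at h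
  simp [PySem.Dict.getD, Ne.symm r1, Ne.symm r2, Ne.symm r3, Ne.symm r4, Ne.symm r5, PySem.Dict.get?] at h

-- raw-branch + scan together equal the reverse-index lookup, for target norm of rawT
lemma branch_eq (dn : String) (rawT : String) :
    (if ((PySem.Dict.getD specializationAliases rawT []).map (fun x => normalizeText (some x))).contains dn
       then true else matchLoop dn (normalizeText (some rawT)) specializationAliases.items)
      = (PySem.Dict.get? aliasToCanon dn == some (normalizeText (some rawT))) := by
  by_cases h2 : (((PySem.Dict.getD specializationAliases rawT []).map (fun x => normalizeText (some x))).contains dn) = true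
  · rw [if_pos h2, ← matchLoop_eq_lookup, rawBranch_subsumed rawT _ h2]
  · rw [if_neg (by simpa using h2), matchLoop_eq_lookup]

-- ===== VERDICT (by name: the statement is the Claim_ definition above) =====
theorem is_specialization_match_py_spec : Claim_equal_is_specialization_match_py := by
  have main : ∀ (d : Option String) (rawT : String),
      is_specialization_match_py d (some rawT) = is_specialization_match_py_alt d (some rawT) := by
    intro d rawT
    unfold is_specialization_match_py is_specialization_match_py_alt
    by_cases h0 : (normalizeText d == "" || normalizeText (some rawT) == "") = true
    · simp only [h0, if_true]
    · simp only [h0, Bool.false_eq_true, if_false]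
      by_cases h1 : normalizeText d = normalizeText (some rawT)
      · simp [h1]
      · have h1b : (normalizeText d == normalizeText (some rawT)) = false := by simp [h1]
        simp only [h1b, Bool.false_eq_true, if_false, Bool.false_or]
        exact branch_eq (normalizeText d) rawT
  intro d t _
  unfold Spec_is_specialization_match_py
  cases t with
  | none =>
      have hnone : ∀ x : Option String, is_specialization_match_py x none = is_specialization_match_py x (some "") := by
        intro x; rfl
      have hnone' : ∀ x : Option String, is_specialization_match_py_alt x none = is_specialization_match_py_alt x (some "") := by
        intro x; rfl
      rw [hnone, hnone', main]
  | some s => exact main d s
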